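-- pv_equiv track=rewrite | github.com/rm-3284/CLT_output_language_features | src/supernode_threshold.py | threshold_prune
-- ===== SOURCE A (Python) =====
-- def threshold_prune(lang_features: dict[str, int]) -> list[int]:
--     options_set = set()
--     for value in lang_features.values():
--         options_set.add(value)
--     options = [0]
--     options.extend(list(options_set))
--     options.sort()
--     return options
-- ===== SOURCE B (Python) =====
-- def threshold_prune(lang_features: dict[str, int]) -> list[int]:
--     distinct = []
--     for v in sorted(lang_features.values()):
--         if not distinct or distinct[-1] != v:
--             distinct.append(v)
--     return sorted([0] + distinct)
-- ===== Notes on version B (the rewrite author's own statement) =====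
-- stated objective: alternative
-- what changed: B collects the distinct values by sorting them and removing adjacent duplicates in a single comparison pass instead of A's hash-set dedup, then sorts 0 into the distinct list.
import Mathlib
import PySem

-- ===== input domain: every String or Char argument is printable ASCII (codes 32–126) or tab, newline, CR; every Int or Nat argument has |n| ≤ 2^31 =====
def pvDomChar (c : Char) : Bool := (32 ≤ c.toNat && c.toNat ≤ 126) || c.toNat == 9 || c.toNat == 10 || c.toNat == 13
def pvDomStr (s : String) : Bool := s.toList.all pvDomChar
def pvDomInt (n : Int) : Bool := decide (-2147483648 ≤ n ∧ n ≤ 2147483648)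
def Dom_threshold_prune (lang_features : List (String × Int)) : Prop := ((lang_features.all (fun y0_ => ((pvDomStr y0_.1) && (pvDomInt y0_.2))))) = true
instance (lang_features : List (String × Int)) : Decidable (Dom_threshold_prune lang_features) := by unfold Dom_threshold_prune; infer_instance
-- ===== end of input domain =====

-- B collects the distinct values by sorting them and removing adjacent duplicates in one
-- comparison pass (no set), then sorts 0 into the distinct list; same return value as A.

-- ===== PORT A =====
def threshold_prune (lang_features : List (String × Int)) : List Int :=
  -- options_set = set(); for value in lang_features.values(): options_set.add(value)
  let options_set : PySem.Set Int :=
    (PySem.Dict.ofList lang_features).values.foldl PySem.Set.add PySem.Set.empty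
  -- options = [0]; options.extend(list(options_set)); options.sort()
  -- (list(options_set) iterates in hash order; the subsequent sort of Ints makes the
  --  result order-independent, so consuming the Set list directly is exact)
  let options : List Int := [0] ++ options_set
  PySem.List.sorted options (fun x => x) false

-- ===== PORT B =====
def threshold_prune_alt (lang_features : List (String × Int)) : List Int :=
  -- distinct = []; for v in sorted(lang_features.values()): if not distinct or distinct[-1] != v: distinct.append(v)
  let distinct :=
    (PySem.List.sorted (PySem.Dict.ofList lang_features).values (fun x => x) false).foldl
      (fun acc v => if acc.getLast? ≠ some v then acc ++ [v] else acc) []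
  -- return sorted([0] + distinct)
  PySem.List.sorted ([0] ++ distinct) (fun x => x) false

-- ===== PRECONDITION & SPEC =====
def Spec_threshold_prune (lang_features : List (String × Int)) (out : List Int) : Prop := out = threshold_prune_alt lang_features
instance (lang_features : List (String × Int)) (out : List Int) : Decidable (Spec_threshold_prune lang_features out) := by unfold Spec_threshold_prune; infer_instance

-- ===== CLAIM (what is proved, stated in full; the proofs are below) =====
def Claim_equal_threshold_prune : Prop := ∀ (lang_features : List (String × Int)), Dom_threshold_prune lang_features → Spec_threshold_prune lang_features (threshold_prune lang_features)

-- ===== LEMMAS AND PROOFS =====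

-- the adjacent-dedup fold: result is strictly increasing and has the same members
theorem dedup_fold_invariant (l : List Int) :
    ∀ (acc : List Int), acc.Pairwise (· < ·) → l.Pairwise (· ≤ ·) →
      (∀ a ∈ acc, ∀ x ∈ l, a ≤ x) →
      (l.foldl (fun acc v => if acc.getLast? ≠ some v then acc ++ [v] else acc) acc).Pairwise (· < ·) ∧
      (∀ x, x ∈ l.foldl (fun acc v => if acc.getLast? ≠ some v then acc ++ [v] else acc) acc ↔ x ∈ acc ∨ x ∈ l) := by
  induction l with
  | nil => intro acc hacc _ _; simpa using hacc
  | cons v t ih =>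
    intro acc hacc hl hconn
    have hl' : t.Pairwise (· ≤ ·) := hl.tail
    have hvt : ∀ x ∈ t, v ≤ x := fun x hx => (List.pairwise_cons.mp hl).1 x hx
    simp only [List.foldl_cons]
    by_cases hlast : acc.getLast? = some v
    · have hv_mem : v ∈ acc := List.mem_of_getLast? hlast
      simp only [hlast, ne_eq, not_true_eq_false, if_false]
      have hconn' : ∀ a ∈ acc, ∀ x ∈ t, a ≤ x := fun a ha x hx => hconn a ha x (by simp [hx])
      obtain ⟨h1, h2⟩ := ih acc hacc hl' hconn'
      refine ⟨h1, fun x => ?_⟩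
      rw [h2]
      constructor
      · rintro (h | h) <;> simp [h]
      · rintro (h | h)
        · exact Or.inl h
        · rcases List.mem_cons.mp h with h | h
          · exact Or.inl (h ▸ hv_mem)
          · exact Or.inr h
    · simp only [hlast, ne_eq, not_false_iff, if_pos]
      -- v ∉ acc : otherwise v ≤ getLast acc ≤ v so getLast? = some v
      have hv_not : v ∉ acc := by
        intro hv
        have hne : acc ≠ [] := by rintro rfl; simp at hv
        have hgl : acc.getLast? = some (acc.getLast hne) := List.getLast?_eq_getLast_of_ne_nil hne
        have hglmem : acc.getLast hne ∈ acc := List.getLast_mem hne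
        have h1 : acc.getLast hne ≤ v := hconn _ hglmem v (by simp)
        have h2 : v ≤ acc.getLast hne := by
          rcases List.getLast?_eq_some_iff.mp hgl with ⟨init, hinit⟩
          rw [hinit] at hv hacc
          rcases List.mem_append.mp hv with h | h
          · have := (List.pairwise_append.mp hacc).2.2 v h (acc.getLast hne) (by simp)
            exact le_of_lt this
          · simp at h; omega
        exact hlast (by rw [hgl]; congr 1; omega)
      have hacc' : (acc ++ [v]).Pairwise (· < ·) := by
        rw [List.pairwise_append]
        refine ⟨hacc, by simp, fun a ha b hb => ?_⟩
        simp at hb; rw [hb]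
        exact lt_of_le_of_ne (hconn a ha v (by simp)) (fun h => hv_not (h ▸ ha))
      have hconn' : ∀ a ∈ acc ++ [v], ∀ x ∈ t, a ≤ x := by
        intro a ha x hx
        rcases List.mem_append.mp ha with h | h
        · exact hconn a h x (by simp [hx])
        · simp at h; subst h; exact hvt x hx
      obtain ⟨h1, h2⟩ := ih (acc ++ [v]) hacc' hl' hconn'
      refine ⟨h1, fun x => ?_⟩
      rw [h2]
      simp only [List.mem_append, List.mem_cons]
      tauto

-- the set A builds, as ofList
theorem a_set_eq (lf : List (String × Int)) :
    (PySem.Dict.ofList lf).values.foldl PySem.Set.add PySem.Set.empty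
      = PySem.Set.ofList (PySem.Dict.ofList lf).values :=
  (PySem.Set.ofList_eq_foldl _).symm

theorem threshold_prune_spec : Claim_equal_threshold_prune := by
  intro lf _
  unfold Spec_threshold_prune threshold_prune threshold_prune_alt
  rw [a_set_eq]
  set vs := (PySem.Dict.ofList lf).values with hvs
  set D := (PySem.List.sorted vs (fun x => x) false).foldl
      (fun acc v => if acc.getLast? ≠ some v then acc ++ [v] else acc) [] with hD
  have hpw : (PySem.List.sorted vs (fun x => x) false).Pairwise (· ≤ ·) := by
    simpa using PySem.List.sorted_pairwise (xs := vs) (key := fun x => x)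
  obtain ⟨hDpw, hDmem⟩ :=
    dedup_fold_invariant (PySem.List.sorted vs (fun x => x) false) [] (by simp) hpw (by simp)
  rw [← hD] at hDpw hDmem
  have hDnodup : D.Nodup := hDpw.imp ne_of_lt
  have hSnodup : (PySem.Set.ofList vs : List Int).Nodup := PySem.Set.nodup_ofList vs
  have hSD : (PySem.Set.ofList vs : List Int).Perm D := by
    rw [List.perm_ext_iff_of_nodup hSnodup hDnodup]
    intro x
    rw [hDmem x]
    simp [PySem.Set.mem_ofList, PySem.List.mem_sorted]
  exact PySem.List.sorted_eq_sorted_of_perm _ _ _ (fun a b h => h)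
    (List.Perm.append_left [0] hSD)
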